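-- pv_equiv track=rewrite | github.com/mcdowellj43/Argus_backend | modules/network_vuln_scan.py | assess_network_vulnerability_risk
-- ===== SOURCE A (Python) =====
-- def assess_network_vulnerability_risk(results):
--     """Assess security risk level of network vulnerability findings"""
--     findings = []
--     severity = "I"
--
--     vulnerabilities = results.get("vulnerabilities", [])
--     open_ports = results.get("open_ports", [])
--
--     if not vulnerabilities and not open_ports:
--         return findings, severity
--
--     # Count vulnerabilities by severity
--     critical_count = len([v for v in vulnerabilities if v.get('severity') == 'critical'])
--     high_count = len([v for v in vulnerabilities if v.get('severity') == 'high'])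
--     medium_count = len([v for v in vulnerabilities if v.get('severity') == 'medium'])
--
--     # Critical findings
--     if critical_count > 0:
--         severity = "C"
--         findings.append(f"Critical vulnerabilities found: {critical_count} critical issues detected")
--
--         # List critical vulnerabilities
--         critical_vulns = [v for v in vulnerabilities if v.get('severity') == 'critical']
--         for vuln in critical_vulns[:3]:  # Show first 3
--             findings.append(f"Critical: {vuln.get('type', 'Unknown')} - {vuln.get('description', 'No description')}")
--
--     # High findings
--     if high_count > 0:
--         if severity == "I":
--             severity = "H"
--         findings.append(f"High-risk vulnerabilities: {high_count} high-severity issues detected")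
--
--     # Medium findings
--     if medium_count > 0:
--         if severity == "I":
--             severity = "W"
--         findings.append(f"Medium-risk vulnerabilities: {medium_count} medium-severity issues detected")
--
--     # Open ports analysis
--     if open_ports:
--         if severity == "I":
--             severity = "W"
--         findings.append(f"Open services detected: {len(open_ports)} services accessible")
--
--         # Identify high-risk services
--         high_risk_services = ['SSH', 'FTP', 'SMB', 'RDP', 'VNC']
--         risky_services = [port for port in open_ports if port.get('service') in high_risk_services]
--
--         if risky_services:
--             findings.append(f"High-risk services: {len(risky_services)} potentially dangerous services open")
--
--     return findings, severity
-- ===== SOURCE B (Python) =====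
-- def assess_network_vulnerability_risk(results):
--     """Single pass over vulnerabilities tallying severities and collecting criticals."""
--     vulnerabilities = results.get("vulnerabilities", [])
--     open_ports = results.get("open_ports", [])
--
--     criticals, high_count, medium_count = [], 0, 0
--     for v in vulnerabilities:
--         s = v.get('severity')
--         if s == 'critical':
--             criticals.append(v)
--         elif s == 'high':
--             high_count += 1
--         elif s == 'medium':
--             medium_count += 1
--
--     severity = ("C" if criticals else
--                 "H" if high_count else
--                 "W" if medium_count or open_ports else
--                 "I")
--
--     findings = []
--     if criticals:
--         findings.append(f"Critical vulnerabilities found: {len(criticals)} critical issues detected")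
--         findings.extend(
--             f"Critical: {vuln.get('type', 'Unknown')} - {vuln.get('description', 'No description')}"
--             for vuln in criticals[:3])
--     if high_count:
--         findings.append(f"High-risk vulnerabilities: {high_count} high-severity issues detected")
--     if medium_count:
--         findings.append(f"Medium-risk vulnerabilities: {medium_count} medium-severity issues detected")
--     if open_ports:
--         findings.append(f"Open services detected: {len(open_ports)} services accessible")
--         risky = sum(1 for port in open_ports
--                     if port.get('service') in ('SSH', 'FTP', 'SMB', 'RDP', 'VNC'))
--         if risky:
--             findings.append(f"High-risk services: {risky} potentially dangerous services open")
--     return findings, severity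
-- ===== Notes on version B (the rewrite author's own statement) =====
-- stated objective: simpler
-- what changed: One pass over vulnerabilities tallies high/medium counts and collects the critical vulns in order, and severity is computed once as a single conditional expression, replacing A's four filtering re-scans and the scattered severity-promotion assignments; the risky-services scan becomes a count instead of building a list.
import Mathlib
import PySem

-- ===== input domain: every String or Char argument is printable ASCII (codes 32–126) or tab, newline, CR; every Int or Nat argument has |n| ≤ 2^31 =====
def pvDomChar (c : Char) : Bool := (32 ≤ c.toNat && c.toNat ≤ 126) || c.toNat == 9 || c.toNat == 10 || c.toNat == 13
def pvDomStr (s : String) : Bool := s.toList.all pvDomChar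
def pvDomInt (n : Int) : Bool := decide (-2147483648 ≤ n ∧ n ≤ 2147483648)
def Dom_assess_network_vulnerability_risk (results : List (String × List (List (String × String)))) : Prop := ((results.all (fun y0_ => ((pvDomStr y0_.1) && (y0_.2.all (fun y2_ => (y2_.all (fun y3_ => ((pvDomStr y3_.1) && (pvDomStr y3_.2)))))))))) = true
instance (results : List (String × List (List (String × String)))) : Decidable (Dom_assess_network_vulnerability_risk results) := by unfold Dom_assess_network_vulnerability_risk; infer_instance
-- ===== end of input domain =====

-- B tallies severities and collects critical vulns in ONE pass and computes severity as one
-- conditional expression, replacing A's four filtering re-scans and scattered promotions (objective: simpler).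

-- shared helper: Python dict.get on an association list (first match), exact
def pvGet? (d : List (String × String)) (k : String) : Option String :=
  (d.find? (fun p => p.1 == k)).map (·.2)

def pvGetD (d : List (String × String)) (k dflt : String) : String :=
  (pvGet? d k).getD dflt

-- results.get(k, []) on the outer dict, exact
def pvGetL (results : List (String × List (List (String × String)))) (k : String) :
    List (List (String × String)) :=
  ((results.find? (fun p => p.1 == k)).map (·.2)).getD []

-- ===== PORT A =====
def assess_network_vulnerability_risk (results : List (String × List (List (String × String)))) : List String × String :=
  let findings : List String := []
  let severity := "I"
  let vulnerabilities := pvGetL results "vulnerabilities"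
  let open_ports := pvGetL results "open_ports"
  if vulnerabilities.isEmpty && open_ports.isEmpty then (findings, severity) else
  let critical_count := (vulnerabilities.filter (fun v => pvGet? v "severity" == some "critical")).length
  let high_count := (vulnerabilities.filter (fun v => pvGet? v "severity" == some "high")).length
  let medium_count := (vulnerabilities.filter (fun v => pvGet? v "severity" == some "medium")).length
  -- each reassignment of the (findings, severity) pair becomes a new state st1..st4 (st.1 = findings, st.2 = severity)
  let st1 : List String × String :=
    if critical_count > 0 then
      let severity := "C"
      let findings := findings ++ ["Critical vulnerabilities found: " ++ PySem.Int.toStr critical_count ++ " critical issues detected"]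
      let critical_vulns := vulnerabilities.filter (fun v => pvGet? v "severity" == some "critical")
      -- critical_vulns[:3] with a nonnegative bound = take 3 (exact)
      let findings := (critical_vulns.take 3).foldl
        (fun fs vuln => fs ++ ["Critical: " ++ pvGetD vuln "type" "Unknown" ++ " - " ++ pvGetD vuln "description" "No description"]) findings
      (findings, severity)
    else (findings, severity)
  let st2 : List String × String :=
    if high_count > 0 then
      (st1.1 ++ ["High-risk vulnerabilities: " ++ PySem.Int.toStr high_count ++ " high-severity issues detected"],
       if st1.2 == "I" then "H" else st1.2)
    else st1
  let st3 : List String × String :=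
    if medium_count > 0 then
      (st2.1 ++ ["Medium-risk vulnerabilities: " ++ PySem.Int.toStr medium_count ++ " medium-severity issues detected"],
       if st2.2 == "I" then "W" else st2.2)
    else st2
  let st4 : List String × String :=
    if !open_ports.isEmpty then
      let severity := if st3.2 == "I" then "W" else st3.2
      let findings := st3.1 ++ ["Open services detected: " ++ PySem.Int.toStr open_ports.length ++ " services accessible"]
      -- port.get('service') in high_risk_services: None is in no list of strings (exact)
      let risky_services := open_ports.filter (fun port => ["SSH", "FTP", "SMB", "RDP", "VNC"].any (fun s => pvGet? port "service" == some s))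
      let findings := if !risky_services.isEmpty then
          findings ++ ["High-risk services: " ++ PySem.Int.toStr risky_services.length ++ " potentially dangerous services open"]
        else findings
      (findings, severity)
    else st3
  st4

-- ===== PORT B =====
def assess_network_vulnerability_risk_alt (results : List (String × List (List (String × String)))) : List String × String :=
  let vulnerabilities := pvGetL results "vulnerabilities"
  let open_ports := pvGetL results "open_ports"
  let st := vulnerabilities.foldl
    (fun (st : List (List (String × String)) × Nat × Nat) v =>
      let s := pvGet? v "severity"
      if s == some "critical" then (st.1 ++ [v], st.2.1, st.2.2)
      else if s == some "high" then (st.1, st.2.1 + 1, st.2.2)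
      else if s == some "medium" then (st.1, st.2.1, st.2.2 + 1)
      else st) ([], 0, 0)
  let criticals := st.1
  let high_count := st.2.1
  let medium_count := st.2.2
  let severity :=
    if !criticals.isEmpty then "C"
    else if high_count ≠ 0 then "H"
    else if medium_count ≠ 0 || !open_ports.isEmpty then "W"
    else "I"
  let findings : List String := []
  let findings :=
    if !criticals.isEmpty then
      findings ++ ["Critical vulnerabilities found: " ++ PySem.Int.toStr criticals.length ++ " critical issues detected"]
        ++ (criticals.take 3).map (fun vuln => "Critical: " ++ pvGetD vuln "type" "Unknown" ++ " - " ++ pvGetD vuln "description" "No description")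
    else findings
  let findings := if high_count ≠ 0 then findings ++ ["High-risk vulnerabilities: " ++ PySem.Int.toStr high_count ++ " high-severity issues detected"] else findings
  let findings := if medium_count ≠ 0 then findings ++ ["Medium-risk vulnerabilities: " ++ PySem.Int.toStr medium_count ++ " medium-severity issues detected"] else findings
  let findings :=
    if !open_ports.isEmpty then
      let findings := findings ++ ["Open services detected: " ++ PySem.Int.toStr open_ports.length ++ " services accessible"]
      let risky := open_ports.countP (fun port => ["SSH", "FTP", "SMB", "RDP", "VNC"].any (fun s => pvGet? port "service" == some s))
      if risky ≠ 0 then findings ++ ["High-risk services: " ++ PySem.Int.toStr risky ++ " potentially dangerous services open"] else findings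
    else findings
  (findings, severity)

-- ===== PRECONDITION & SPEC =====
def Spec_assess_network_vulnerability_risk (results : List (String × List (List (String × String)))) (out : List String × String) : Prop := out = assess_network_vulnerability_risk_alt results
instance (results : List (String × List (List (String × String)))) (out : List String × String) : Decidable (Spec_assess_network_vulnerability_risk results out) := by unfold Spec_assess_network_vulnerability_risk; infer_instance

-- ===== CLAIM (what is proved, stated in full; the proofs are below) =====
def Claim_equal_assess_network_vulnerability_risk : Prop := ∀ (results : List (String × List (List (String × String)))), Dom_assess_network_vulnerability_risk results → Spec_assess_network_vulnerability_risk results (assess_network_vulnerability_risk results)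

-- ===== LEMMAS AND PROOFS =====

theorem fold_tally (l : List (List (String × String))) (cs : List (List (String × String))) (hi med : Nat) :
    l.foldl
      (fun (st : List (List (String × String)) × Nat × Nat) v =>
        let s := pvGet? v "severity"
        if s == some "critical" then (st.1 ++ [v], st.2.1, st.2.2)
        else if s == some "high" then (st.1, st.2.1 + 1, st.2.2)
        else if s == some "medium" then (st.1, st.2.1, st.2.2 + 1)
        else st) (cs, hi, med)
    = (cs ++ l.filter (fun v => pvGet? v "severity" == some "critical"),
       hi + l.countP (fun v => pvGet? v "severity" == some "high"),
       med + l.countP (fun v => pvGet? v "severity" == some "medium")) := by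
  induction l generalizing cs hi med with
  | nil => simp
  | cons x xs ih =>
      simp only [List.foldl_cons, List.filter_cons, List.countP_cons]
      by_cases hc : pvGet? x "severity" == some "critical" <;>
        by_cases hh : pvGet? x "severity" == some "high" <;>
          by_cases hm : pvGet? x "severity" == some "medium" <;>
            simp_all <;> omega

theorem foldl_snoc_map (l : List (List (String × String))) (fs : List String)
    (f : List (String × String) → String) :
    l.foldl (fun fs v => fs ++ [f v]) fs = fs ++ l.map f := by
  induction l generalizing fs with
  | nil => simp
  | cons x xs ih => simp [ih]

-- ===== VERDICT (by name: the statement is the Claim_ definition above) =====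
theorem assess_network_vulnerability_risk_spec : Claim_equal_assess_network_vulnerability_risk := by
  intro results _
  unfold Spec_assess_network_vulnerability_risk
  unfold assess_network_vulnerability_risk assess_network_vulnerability_risk_alt
  simp only [fold_tally, foldl_snoc_map, List.nil_append, Nat.zero_add, List.countP_eq_length_filter]
  generalize pvGetL results "vulnerabilities" = vulns
  generalize pvGetL results "open_ports" = ports
  by_cases hv : vulns = []
  · subst hv
    by_cases hp : ports = [] <;> simp [hp]
  · have hvne : vulns.isEmpty = false := by simp [hv]
    generalize vulns.filter (fun v => pvGet? v "severity" == some "critical") = cf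
    generalize vulns.filter (fun v => pvGet? v "severity" == some "high") = hf
    generalize vulns.filter (fun v => pvGet? v "severity" == some "medium") = mf
    by_cases h1 : cf = [] <;> by_cases h2 : hf = [] <;> by_cases h3 : mf = [] <;>
      by_cases hp : ports = [] <;>
      simp [hvne, h1, h2, h3, hp, List.length_pos_iff, List.length_eq_zero_iff]
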